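-- pv_equiv track=rewrite | github.com/Cesino/Client_Initial_Project | WardrobeTrip.py | categorization_clothings
-- ===== SOURCE A (Python) =====
-- def categorization_clothings(items):
--     category_dictionary = dict()
--     for item in items:
--         cat = items[item]['category']
--         if cat not in category_dictionary:
--             category_dictionary[cat] = {item : items[item]}
--         else:
--             category_dictionary[cat][item] = items[item]
--     return category_dictionary
-- ===== SOURCE B (Python) =====
-- def categorization_clothings(items):
--     # Partition refinement: repeatedly peel off the first remaining key's category,
--     # collect its whole group by a rescan, and drop those keys from the worklist.
--     pairs = []
--     keys = list(items)
--     while keys: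
--         c = items[keys[0]]['category']
--         pairs.append((c, {k: items[k] for k in keys if items[k]['category'] == c}))
--         keys = [k for k in keys if items[k]['category'] != c]
--     return dict(pairs)
-- ===== Notes on version B (the rewrite author's own statement) =====
-- stated objective: alternative
-- what changed: A makes one incremental pass inserting every item into a nested dict (create-or-update per category); B is a partition-refinement loop: it repeatedly takes the first remaining key's category, rescans the worklist to collect that whole group at once, removes those keys, and assembles the dict from the collected (category, group) pairs at the end.
import Mathlib
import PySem

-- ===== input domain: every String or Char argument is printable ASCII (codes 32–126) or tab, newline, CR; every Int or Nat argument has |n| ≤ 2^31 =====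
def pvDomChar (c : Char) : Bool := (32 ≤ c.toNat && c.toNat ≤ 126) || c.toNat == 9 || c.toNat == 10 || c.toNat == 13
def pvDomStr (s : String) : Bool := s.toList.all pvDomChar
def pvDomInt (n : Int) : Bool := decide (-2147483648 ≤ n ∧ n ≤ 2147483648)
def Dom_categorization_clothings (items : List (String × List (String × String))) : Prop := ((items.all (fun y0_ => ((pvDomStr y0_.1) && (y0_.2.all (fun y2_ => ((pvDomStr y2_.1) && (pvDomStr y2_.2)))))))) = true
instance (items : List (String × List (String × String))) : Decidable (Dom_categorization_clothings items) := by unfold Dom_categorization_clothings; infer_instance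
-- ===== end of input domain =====

-- B replaces A's single incremental grouping pass (nested-dict create-or-update inserts) by a
-- partition-refinement worklist loop: peel off the first remaining key's category, collect its
-- whole group by a rescan, drop those keys, and build the dict from the pairs at the end;
-- objective: alternative decomposition, same result.

-- shared helpers: items[k] and items[k]['category'] as both Pythons evaluate them
def pvItemVal (items : List (String × List (String × String))) (k : String) : List (String × String) :=
  PySem.Dict.getD (PySem.Dict.mk items) k []

def pvCat (items : List (String × List (String × String))) (k : String) : String :=
  PySem.Dict.getD (PySem.Dict.mk (pvItemVal items k)) "category" ""

-- ===== PORT A =====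
-- loop body of A: create the per-category sub-dict or insert into the existing one
def pvAStep (items : List (String × List (String × String)))
    (cd : PySem.Dict String (PySem.Dict String (List (String × String))))
    (p : String × List (String × String)) :
    PySem.Dict String (PySem.Dict String (List (String × String))) :=
  let cat := pvCat items p.1
  if cd.contains cat = false then
    cd.insert cat (PySem.Dict.mk [(p.1, pvItemVal items p.1)])
  else
    cd.insert cat ((cd.getD cat (PySem.Dict.mk [])).insert p.1 (pvItemVal items p.1))

def categorization_clothings (items : List (String × List (String × String))) :
    List (String × List (String × List (String × String))) :=
  ((items.foldl (pvAStep items) (PySem.Dict.mk [])).items).map (fun q => (q.1, q.2.items))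

-- ===== PORT B =====
-- B's while-loop over the shrinking worklist `keys`: emit (c, group) for the first key's
-- category c (group = inner dict comprehension over the worklist), recurse on the keys
-- whose category is not c
def pvGo (items : List (String × List (String × String))) :
    List (String × List (String × String)) → List (String × List (String × List (String × String)))
  | [] => []
  | p :: ks =>
    (pvCat items p.1,
      ((p :: ks).foldl
        (fun d q => if pvCat items q.1 == pvCat items p.1 then d.insert q.1 (pvItemVal items q.1) else d)
        PySem.Dict.empty).items)
      :: pvGo items ((p :: ks).filter (fun q => !(pvCat items q.1 == pvCat items p.1)))
  termination_by ks => ks.length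
  decreasing_by
    simp only [List.filter_cons, beq_self_eq_true, Bool.not_true, Bool.false_eq_true, if_false,
      List.length_cons]
    exact Nat.lt_succ_of_le (List.length_filter_le _ _)

def categorization_clothings_alt (items : List (String × List (String × String))) :
    List (String × List (String × List (String × String))) :=
  (PySem.Dict.ofList (pvGo items items)).items

-- ===== PRECONDITION & SPEC =====
-- Pre_ excludes exactly the inputs on which Python A raises KeyError: some item's dict lacks 'category'.
def Pre_categorization_clothings (items : List (String × List (String × String))) : Prop :=
  ∀ p ∈ items, "category" ∈ (pvItemVal items p.1).map Prod.fst
instance (items : List (String × List (String × String))) : Decidable (Pre_categorization_clothings items) := by unfold Pre_categorization_clothings; infer_instance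

def pvWitness_categorization_clothings : (List (String × List (String × String))) :=
  [("hat", [("category", "head")]), ("scarf", [("category", "neck"), ("color", "red")])]

def Spec_categorization_clothings (items : List (String × List (String × String))) (out : List (String × List (String × List (String × String)))) : Prop := out = categorization_clothings_alt items
instance (items : List (String × List (String × String))) (out : List (String × List (String × List (String × String)))) : Decidable (Spec_categorization_clothings items out) := by unfold Spec_categorization_clothings; infer_instance

-- ===== CLAIM (what is proved, stated in full; the proofs are below) =====
def Claim_equal_categorization_clothings : Prop := ∀ (items : List (String × List (String × String))), Dom_categorization_clothings items → Pre_categorization_clothings items → Spec_categorization_clothings items (categorization_clothings items)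

-- ===== LEMMAS AND PROOFS =====

-- proof-side name for B's inner loop body (definitionally the lambda in pvGo)
def pvBStep (items : List (String × List (String × String))) (c : String)
    (inner : PySem.Dict String (List (String × String)))
    (p : String × List (String × String)) :
    PySem.Dict String (List (String × String)) :=
  if pvCat items p.1 == c then inner.insert p.1 (pvItemVal items p.1) else inner

-- B's inner loop is the identity on lists none of whose elements match the category
lemma pv_bfold_id (items : List (String × List (String × String))) (k : String)
    (L : List (String × List (String × String))) (d : PySem.Dict String (List (String × String)))
    (h : ∀ q ∈ L, pvCat items q.1 ≠ k) :
    L.foldl (pvBStep items k) d = d := by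
  induction L generalizing d with
  | nil => rfl
  | cons q L ih =>
      have hq : (pvCat items q.1 == k) = false := by
        simpa using h q (by simp)
      simp only [List.foldl_cons, pvBStep, hq, Bool.false_eq_true, if_false]
      exact ih _ (fun r hr => h r (by simp [hr]))

-- invariant: A's nested dict after any prefix L is exactly the per-category groups over L,
-- keyed by the distinct categories of L in first-seen order
lemma pv_main (items : List (String × List (String × String)))
    (L : List (String × List (String × String))) :
    (L.foldl (pvAStep items) (PySem.Dict.mk [])).items
      = (PySem.Set.ofList (L.map (fun p => pvCat items p.1))).map
          (fun k => (k, L.foldl (pvBStep items k) (PySem.Dict.mk []))) := by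
  induction L using List.reverseRecOn with
  | nil => rfl
  | append_singleton L p ih =>
      have hkeys : (L.foldl (pvAStep items) (PySem.Dict.mk [])).keys
          = PySem.Set.ofList (L.map (fun p => pvCat items p.1)) := by
        simp only [PySem.Dict.keys, ih, List.map_map]
        simp [Function.comp_def]
      have hbfold : ∀ k, (L ++ [p]).foldl (pvBStep items k) (PySem.Dict.mk [])
          = pvBStep items k (L.foldl (pvBStep items k) (PySem.Dict.mk [])) p := by
        intro k; rw [List.foldl_append]; rfl
      rw [List.foldl_append, List.foldl_cons, List.foldl_nil, List.map_append,
        List.map_singleton, PySem.Set.ofList_append_singleton]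
      by_cases hmem : pvCat items p.1 ∈ L.map (fun p => pvCat items p.1)
      · -- category already present: A updates the existing sub-dict in place
        have hc : (L.foldl (pvAStep items) (PySem.Dict.mk [])).contains (pvCat items p.1) = true := by
          rw [PySem.Dict.contains_iff_mem_keys, hkeys]
          exact (PySem.Set.mem_ofList _ _).mpr hmem
        have hnd : (L.foldl (pvAStep items) (PySem.Dict.mk [])).keys.Nodup := by
          rw [hkeys]; exact PySem.Set.nodup_ofList _
        have hgetD : (L.foldl (pvAStep items) (PySem.Dict.mk [])).getD (pvCat items p.1)
            (PySem.Dict.mk []) = L.foldl (pvBStep items (pvCat items p.1)) (PySem.Dict.mk []) := by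
          refine PySem.Dict.getD_of_mem_items _ ?_ hnd _
          rw [ih]
          exact List.mem_map_of_mem ((PySem.Set.mem_ofList _ _).mpr hmem)
        rw [PySem.Set.add_of_mem ((PySem.Set.mem_ofList _ _).mpr hmem)]
        simp only [pvAStep, hc, Bool.true_eq_false, if_false]
        rw [PySem.Dict.items_insert_of_contains _ _ hc, ih, List.map_map]
        apply List.map_congr_left
        intro k hk
        by_cases hkc : k = pvCat items p.1
        · subst hkc
          simp only [Function.comp_apply, beq_self_eq_true, if_true, hbfold, pvBStep,
            beq_self_eq_true]
          rw [hgetD]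
        · have hne : (k == pvCat items p.1) = false := by simpa using hkc
          have hne' : (pvCat items p.1 == k) = false := by simpa using (Ne.symm hkc)
          simp only [Function.comp_apply, hne, Bool.false_eq_true, if_false, hbfold, pvBStep,
            hne']
      · -- new category: A appends a fresh singleton sub-dict
        have hc : (L.foldl (pvAStep items) (PySem.Dict.mk [])).contains (pvCat items p.1) = false := by
          rw [← Bool.not_eq_true, PySem.Dict.contains_iff_mem_keys, hkeys]
          exact fun h => hmem ((PySem.Set.mem_ofList _ _).mp h)
        rw [PySem.Set.add_of_not_mem (fun h => hmem ((PySem.Set.mem_ofList _ _).mp h))]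
        simp only [pvAStep, hc, if_true]
        rw [PySem.Dict.items_insert_of_not_contains _ _ hc, ih, List.map_append,
          List.map_singleton]
        congr 1
        · apply List.map_congr_left
          intro k hk
          have hkL : k ∈ L.map (fun p => pvCat items p.1) := (PySem.Set.mem_ofList _ _).mp hk
          have hne : (pvCat items p.1 == k) = false := by
            simp only [beq_eq_false_iff_ne, ne_eq]
            exact fun h => hmem (h ▸ hkL)
          rw [hbfold]
          simp [pvBStep, hne]
        · have hnone : ∀ q ∈ L, pvCat items q.1 ≠ pvCat items p.1 := by
            intro q hq h
            exact hmem (h ▸ List.mem_map_of_mem hq)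
          rw [hbfold, pv_bfold_id items _ L _ hnone]
          simp only [pvBStep, beq_self_eq_true, if_true]
          rfl

-- filtering away a category ≠ k does not change B's inner fold for k
lemma pv_bfold_filter (items : List (String × List (String × String))) (k c : String)
    (hkc : k ≠ c) (L : List (String × List (String × String)))
    (d : PySem.Dict String (List (String × String))) :
    (L.filter (fun q => !(pvCat items q.1 == c))).foldl (pvBStep items k) d
      = L.foldl (pvBStep items k) d := by
  induction L generalizing d with
  | nil => rfl
  | cons q L ih =>
      by_cases hq : pvCat items q.1 = c
      · have h1 : (!(pvCat items q.1 == c)) = false := by simp [hq]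
        have h2 : (pvCat items q.1 == k) = false := by
          simp only [beq_eq_false_iff_ne, ne_eq, hq]
          exact fun h => hkc h.symm
        simp only [List.filter_cons, h1, Bool.false_eq_true, if_false, List.foldl_cons,
          pvBStep, h2]
        exact ih d
      · have h1 : (!(pvCat items q.1 == c)) = true := by simp [hq]
        simp only [List.filter_cons, h1, if_true, List.foldl_cons]
        exact ih _

-- discard removes all occurrences: it is a filter
lemma pv_discard_eq_filter (x : String) (s : List String) :
    PySem.Set.discard s x = s.filter (fun y => !(y == x)) := by
  induction s with
  | nil => rfl
  | cons a s ihs =>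
      by_cases ha : a = x
      · simp [PySem.Set.discard, ha]
      · have : (a == x) = false := by simpa using ha
        simp [PySem.Set.discard, this]

-- dedup commutes with removing one value
lemma pv_ofList_filter_ne (c : String) (m : List String) :
    PySem.Set.ofList (m.filter (fun y => !(y == c)))
      = (PySem.Set.ofList m).filter (fun y => !(y == c)) := by
  induction m with
  | nil => rfl
  | cons x m ih =>
      rw [PySem.Set.ofList_cons, pv_discard_eq_filter]
      by_cases hx : x = c
      · subst hx
        have h1 : (!(x == x)) = false := by simp
        simp only [List.filter_cons, h1, Bool.false_eq_true, if_false, ih,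
          List.filter_filter]
        apply List.filter_congr
        intro a _
        by_cases hax : a = x <;> simp [hax]
      · have h1 : (!(x == c)) = true := by simpa using hx
        simp only [List.filter_cons, h1, if_true]
        rw [PySem.Set.ofList_cons, pv_discard_eq_filter, ih, List.filter_filter,
          List.filter_filter]
        congr 1
        apply List.filter_congr
        intro a _
        simp [Bool.and_comm]

-- B's worklist recursion computes exactly the first-seen-category groups over its worklist
lemma pv_go (items : List (String × List (String × String)))
    (L : List (String × List (String × String))) :
    pvGo items L
      = (PySem.Set.ofList (L.map (fun p => pvCat items p.1))).map
          (fun k => (k, (L.foldl (pvBStep items k) (PySem.Dict.mk [])).items)) := by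
  induction hn : L.length using Nat.strong_induction_on generalizing L with
  | _ n ih =>
    cases L with
    | nil => simp [pvGo]
    | cons p ks =>
      subst hn
      have hfp : (!(pvCat items p.1 == pvCat items p.1)) = false := by simp
      have hrest_len : ((p :: ks).filter (fun q => !(pvCat items q.1 == pvCat items p.1))).length
          < (p :: ks).length := by
        simp only [List.filter_cons, hfp, Bool.false_eq_true, if_false, List.length_cons]
        exact Nat.lt_succ_of_le (List.length_filter_le _ _)
      have hrec := ih _ hrest_len _ rfl
      rw [pvGo, hrec]
      have hmapfilter : ((p :: ks).filter (fun q => !(pvCat items q.1 == pvCat items p.1))).map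
            (fun p => pvCat items p.1)
          = ((p :: ks).map (fun p => pvCat items p.1)).filter
              (fun y => !(y == pvCat items p.1)) := by
        rw [List.filter_map]; rfl
      rw [hmapfilter, pv_ofList_filter_ne]
      simp only [List.map_cons]
      rw [PySem.Set.ofList_cons, pv_discard_eq_filter]
      simp only [List.map_cons, List.filter_cons, hfp, Bool.false_eq_true, if_false,
        List.filter_filter]
      congr 1
      -- (the head pairs agree definitionally; congr closes them, leaving the tails)
      have hsimp : (PySem.Set.ofList (ks.map (fun p => pvCat items p.1))).filter
            (fun y => !(y == pvCat items p.1) && !(y == pvCat items p.1))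
          = (PySem.Set.ofList (ks.map (fun p => pvCat items p.1))).filter
            (fun y => !(y == pvCat items p.1)) := by
        apply List.filter_congr
        intro a _
        by_cases ha : a = pvCat items p.1 <;> simp [ha]
      rw [hsimp]
      apply List.map_congr_left
      intro k hk
      have hkne : k ≠ pvCat items p.1 := by
        have := (List.mem_filter.mp hk).2
        simpa using this
      congr 1
      rw [pv_bfold_filter items k (pvCat items p.1) hkne]
      simp only [List.foldl_cons]
      have hz : pvBStep items k (PySem.Dict.mk []) p = (PySem.Dict.mk []) := by
        have : (pvCat items p.1 == k) = false := by
          simpa using (Ne.symm hkne)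
        simp [pvBStep, this]
      rw [hz]

-- dict(pairs) with distinct keys returns exactly those pairs
lemma pv_ofList_items_of_nodup {ν : Type} (l : List (String × ν))
    (h : (l.map Prod.fst).Nodup) :
    (PySem.Dict.ofList l).items = l := by
  have := PySem.Dict.items_foldl_insert_fresh l Prod.fst Prod.snd PySem.Dict.empty
    (by intro a _; simp [PySem.Dict.contains_empty]) h
  simpa using this

-- ===== VERDICT (by name: the statement is the Claim_ definition above) =====
theorem categorization_clothings_spec : Claim_equal_categorization_clothings := by
  intro items _ _
  unfold Spec_categorization_clothings categorization_clothings categorization_clothings_alt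
  rw [pv_main, pv_go, List.map_map]
  rw [pv_ofList_items_of_nodup]
  · rfl
  · rw [List.map_map]
    have : ((PySem.Set.ofList (items.map (fun p => pvCat items p.1))).map
        (fun k => (k, (items.foldl (pvBStep items k) (PySem.Dict.mk [])).items))).map Prod.fst
        = PySem.Set.ofList (items.map (fun p => pvCat items p.1)) := by
      rw [List.map_map]; simp [Function.comp_def]
    rw [List.map_map] at this
    rw [this]
    exact PySem.Set.nodup_ofList _
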